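-- pv_equiv track=rewrite | github.com/hjbyt/CodeJam | 2017/qualification/c/solver.py | solve
-- ===== SOURCE A (Python) =====
-- from heapq import heappush, heappop
--
-- def solve(N, K):
--     chunks = [-N]
--     for _ in range(K):
--         c = -heappop(chunks)
--         c -= 1
--         a = c // 2
--         b = c - a
--         heappush(chunks, -a)
--         heappush(chunks, -b)
--     return sorted([a, b], reverse=True)
-- ===== SOURCE B (Python) =====
-- def solve(N, K):
--     # Walk the split tree level by level as (size, count) groups instead of a heap:
--     # the current level has chi chunks of size hi and clo chunks of size hi - 1.
--     hi, chi, clo = N, 1, 0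
--     while 1 < hi and chi + clo < K:
--         K -= chi + clo
--         if hi % 2 == 0:
--             chi, clo = chi, chi + 2 * clo
--         else:
--             chi, clo = 2 * chi + clo, clo
--         hi //= 2
--     s = hi if (hi == 0 or K <= chi) else hi - 1
--     a = (s - 1) // 2
--     return [s - 1 - a, a]
-- ===== Notes on version B (the rewrite author's own statement) =====
-- stated objective: faster
-- what changed: A simulates all K pops one at a time on a max-heap; B walks the split tree level by level, keeping only the two (size, count) groups a level can contain and skipping each whole level in O(1), so no heap and no per-pop work remain.
-- outside the precondition, e.g. on solve(-3, 2): A returns [-1, -2], B returns [-2, -3]; on solve(5, 0): A raises UnboundLocalError, B returns [2, 2]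
import Mathlib
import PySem

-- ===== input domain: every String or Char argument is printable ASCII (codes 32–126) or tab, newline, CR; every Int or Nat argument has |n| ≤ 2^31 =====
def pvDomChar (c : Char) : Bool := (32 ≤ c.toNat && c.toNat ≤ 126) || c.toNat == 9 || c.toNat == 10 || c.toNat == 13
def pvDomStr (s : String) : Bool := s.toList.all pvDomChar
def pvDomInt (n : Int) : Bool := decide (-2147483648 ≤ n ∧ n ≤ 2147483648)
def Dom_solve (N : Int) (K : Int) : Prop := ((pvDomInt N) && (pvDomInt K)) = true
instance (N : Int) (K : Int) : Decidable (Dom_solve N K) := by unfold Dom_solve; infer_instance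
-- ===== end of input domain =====

-- B replaces A's one-pop-at-a-time max-heap by batching whole levels of the split
-- tree as (size, count) groups: O(log) loop instead of K heap operations (objective: faster).

-- ===== PORT A =====
-- heapq.heappush / heappop are ported by their contract (push an element / pop the minimum):
-- a skew heap, so that the port also EVALUATES in O(log n) per operation like Python's heapq.
inductive SkewHeap : Type
  | nil : SkewHeap
  | node : Int → SkewHeap → SkewHeap → SkewHeap
deriving Repr

def SkewHeap.size : SkewHeap → Nat
  | .nil => 0
  | .node _ l r => l.size + r.size + 1

def SkewHeap.merge : SkewHeap → SkewHeap → SkewHeap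
  | .nil, t => t
  | t, .nil => t
  | .node x l r, .node y l' r' =>
    if x ≤ y then .node x (SkewHeap.merge (.node y l' r') r) l
    else .node y (SkewHeap.merge (.node x l r) r') l'
termination_by a b => a.size + b.size
decreasing_by
  all_goals (simp [SkewHeap.size]; try omega)

def heappush (h : SkewHeap) (x : Int) : SkewHeap := h.merge (.node x .nil .nil)

def heappop : SkewHeap → Option (Int × SkewHeap)
  | .nil => none
  | .node x l r => some (x, l.merge r)

-- one iteration of A's loop: heappop the most negative entry (= largest chunk), split it, push both halves
def solveStep (st : SkewHeap × Int × Int) : SkewHeap × Int × Int :=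
  match heappop st.1 with
  | none => st   -- heappop of an empty heap raises IndexError in Python; unreachable here (the heap never shrinks)
  | some (m, rest) =>
    let c := (-m) - 1
    let a := PySem.Int.floordiv c 2
    let b := c - a
    (heappush (heappush rest (-a)) (-b), a, b)

def solve (N : Int) (K : Int) : List Int :=
  let st := (PySem.List.pyRange 0 K 1).foldl (fun st _ => solveStep st)
    (.node (-N) .nil .nil, 0, 0)
  PySem.List.sorted [st.2.1, st.2.2] (fun x => x) true

-- ===== PORT B =====
-- Source B's while-loop; fuel only makes the recursion structural: it bounds the number of
-- iterations (hi strictly decreases while 1 < hi), and solve_alt supplies enough of it.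
def solveAltLoop (fuel : Nat) (hi chi clo K : Int) : List Int :=
  match fuel with
  | 0 => []
  | fuel+1 =>
    if 1 < hi ∧ chi + clo < K then
      let K' := K - (chi + clo)
      let p := if PySem.Int.mod hi 2 = 0 then (chi, chi + 2*clo) else (2*chi + clo, clo)
      solveAltLoop fuel (PySem.Int.floordiv hi 2) p.1 p.2 K'
    else
      let s := if hi = 0 ∨ K ≤ chi then hi else hi - 1
      let a := PySem.Int.floordiv (s-1) 2
      [s - 1 - a, a]

def solve_alt (N : Int) (K : Int) : List Int := solveAltLoop (N.toNat + 2) N 1 0 K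

-- ===== PRECONDITION & SPEC =====
-- Pre_ excludes K ≤ 0, where A raises UnboundLocalError (a and b are never assigned), and negative N,
-- which is outside the problem's natural domain of nonnegative chunk sizes (A's splits of
-- negative chunks produce ever-larger chunks there).
def Pre_solve (N : Int) (K : Int) : Prop := 0 ≤ N ∧ 1 ≤ K
instance (N : Int) (K : Int) : Decidable (Pre_solve N K) := by unfold Pre_solve; infer_instance
def pvWitness_solve : Int × Int := (9, 5)

def Spec_solve (N : Int) (K : Int) (out : List Int) : Prop := out = solve_alt N K
instance (N : Int) (K : Int) (out : List Int) : Decidable (Spec_solve N K out) := by unfold Spec_solve; infer_instance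

-- ===== CLAIM (what is proved, stated in full; the proofs are below) =====
def Claim_equal_solve : Prop := ∀ (N : Int) (K : Int), Dom_solve N K → Pre_solve N K → Spec_solve N K (solve N K)

-- ===== LEMMAS AND PROOFS =====

-- the two halves of a chunk of size s (a = smaller half, b = larger half, as in A)
def aOf (s : Int) : Int := PySem.Int.floordiv (s - 1) 2
def bOf (s : Int) : Int := (s - 1) - aOf s


lemma child_bounds {s : Int} (hs : 1 ≤ s) : 0 ≤ aOf s ∧ aOf s ≤ bOf s ∧ bOf s ≤ s - 1 := by
  simp only [aOf, bOf]
  rw [PySem.Int.floordiv_eq_ediv_of_pos (by omega : (0:Int) < 2)]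
  omega


-- multiset view of a heap (proof-only)
def SkewHeap.toList : SkewHeap → List Int
  | .nil => []
  | .node x l r => x :: (l.toList ++ r.toList)

def SkewHeap.Ordered : SkewHeap → Prop
  | .nil => True
  | .node x l r => (∀ y ∈ l.toList ++ r.toList, x ≤ y) ∧ l.Ordered ∧ r.Ordered

lemma toList_merge (a b : SkewHeap) : (a.merge b).toList.Perm (a.toList ++ b.toList) := by
  induction a, b using SkewHeap.merge.induct with
  | case1 t => simp [SkewHeap.merge, SkewHeap.toList]
  | case2 t => simp [SkewHeap.merge, SkewHeap.toList]
  | case3 x l r y l' r' hxy ih =>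
    rw [SkewHeap.merge, if_pos hxy]
    apply List.perm_iff_count.2
    intro z
    have hc := ih.count_eq z
    simp only [SkewHeap.toList, List.count_append, List.count_cons] at *
    omega
  | case4 x l r y l' r' hxy ih =>
    rw [SkewHeap.merge, if_neg hxy]
    apply List.perm_iff_count.2
    intro z
    have hc := ih.count_eq z
    simp only [SkewHeap.toList, List.count_append, List.count_cons] at *
    omega

lemma Ordered_merge (a b : SkewHeap) (ha : a.Ordered) (hb : b.Ordered) :
    (a.merge b).Ordered := by
  induction a, b using SkewHeap.merge.induct with
  | case1 t => simpa [SkewHeap.merge] using hb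
  | case2 t => simpa [SkewHeap.merge] using ha
  | case3 x l r y l' r' hxy ih =>
    obtain ⟨hra, hal, har⟩ := ha
    obtain ⟨hrb, hbl, hbr⟩ := hb
    rw [SkewHeap.merge, if_pos hxy]
    refine ⟨?_, ih ⟨hrb, hbl, hbr⟩ har, hal⟩
    intro z hz
    rcases List.mem_append.1 hz with hz' | hz'
    · rcases List.mem_append.1 ((toList_merge _ _).subset hz') with hz'' | hz''
      · simp only [SkewHeap.toList, List.mem_cons] at hz''
        rcases hz'' with rfl | hz''
        · exact hxy
        · exact le_trans hxy (hrb z hz'')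
      · exact hra z (List.mem_append.2 (Or.inr hz''))
    · exact hra z (List.mem_append.2 (Or.inl hz'))
  | case4 x l r y l' r' hxy ih =>
    obtain ⟨hra, hal, har⟩ := ha
    obtain ⟨hrb, hbl, hbr⟩ := hb
    rw [SkewHeap.merge, if_neg hxy]
    have hyx : y ≤ x := by omega
    refine ⟨?_, ih ⟨hra, hal, har⟩ hbr, hbl⟩
    intro z hz
    rcases List.mem_append.1 hz with hz' | hz'
    · rcases List.mem_append.1 ((toList_merge _ _).subset hz') with hz'' | hz''
      · simp only [SkewHeap.toList, List.mem_cons] at hz''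
        rcases hz'' with rfl | hz''
        · exact hyx
        · exact le_trans hyx (hra z hz'')
      · exact hrb z (List.mem_append.2 (Or.inr hz''))
    · exact hrb z (List.mem_append.2 (Or.inl hz'))

lemma toList_heappush (h : SkewHeap) (x : Int) :
    (heappush h x).toList.Perm (h.toList ++ [x]) := by
  simpa [SkewHeap.toList] using toList_merge h (.node x .nil .nil)

lemma Ordered_heappush (h : SkewHeap) (x : Int) (hh : h.Ordered) :
    (heappush h x).Ordered :=
  Ordered_merge _ _ hh (by simp [SkewHeap.Ordered, SkewHeap.toList])

lemma solveStep_spec (s : Int) (n : Nat) (hn : 1 ≤ n) (R : List Int) (hR : ∀ x ∈ R, -s ≤ x)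
    (h : SkewHeap) (hord : h.Ordered)
    (hH : h.toList.Perm (List.replicate n (-s) ++ R)) (ab : Int × Int) :
    (solveStep (h, ab)).1.Ordered ∧
    (solveStep (h, ab)).1.toList.Perm (List.replicate (n-1) (-s) ++ (R ++ [-(aOf s), -(bOf s)])) ∧
    (solveStep (h, ab)).2 = (aOf s, bOf s) := by
  cases h with
  | nil =>
    exfalso
    have := hH.length_eq
    simp [SkewHeap.toList] at this
    omega
  | node x l r =>
    obtain ⟨hroot, hol, hor⟩ := hord
    have hlb : ∀ z ∈ (SkewHeap.node x l r).toList, -s ≤ z := by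
      intro z hz
      rcases List.mem_append.1 (hH.subset hz) with hz' | hz'
      · rw [List.eq_of_mem_replicate hz']
      · exact hR z hz'
    have hsmem : (-s) ∈ (SkewHeap.node x l r).toList :=
      hH.mem_iff.2 (List.mem_append.2 (Or.inl (List.mem_replicate.2 ⟨by omega, rfl⟩)))
    have hx : x = -s := by
      have h2 : -s ≤ x := hlb x (by simp [SkewHeap.toList])
      have h1 : x ≤ -s := by
        simp only [SkewHeap.toList, List.mem_cons] at hsmem
        rcases hsmem with h' | h'
        · omega
        · exact hroot _ h'
      omega
    subst hx
    have hrest_ord : (l.merge r).Ordered := Ordered_merge l r hol hor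
    have hstep : solveStep (SkewHeap.node (-s) l r, ab)
        = (heappush (heappush (l.merge r) (-(aOf s))) (-(bOf s)), (aOf s, bOf s)) := by
      simp only [solveStep, heappop, aOf, bOf, neg_neg]
    rw [hstep]
    refine ⟨Ordered_heappush _ _ (Ordered_heappush _ _ hrest_ord), ?_, rfl⟩
    have h1 : (l.merge r).toList.Perm (List.replicate (n-1) (-s) ++ R) := by
      have hH' : ((-s) :: (l.toList ++ r.toList)).Perm ((-s) :: (List.replicate (n-1) (-s) ++ R)) := by
        have heq : (List.replicate n (-s) ++ R) = (-s) :: (List.replicate (n-1) (-s) ++ R) := by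
          cases n with
          | zero => omega
          | succ n => simp [List.replicate_succ]
        rw [← heq]
        simpa [SkewHeap.toList] using hH
      exact (toList_merge l r).trans ((List.perm_cons _).1 hH')
    refine (toList_heappush _ _).trans ?_
    refine (((toList_heappush _ _).append_right _).trans ?_)
    refine (((h1.append_right [-(aOf s)]).append_right [-(bOf s)]).trans ?_)
    apply List.perm_iff_count.2
    intro z
    simp only [List.count_append, List.count_cons, List.count_nil]
    omega
lemma run_pops (s : Int) (hs : 1 ≤ s) :
    ∀ (k n : Nat), k ≤ n → ∀ (R : List Int) (h : SkewHeap), (∀ x ∈ R, -s ≤ x) →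
    h.Ordered → h.toList.Perm (List.replicate n (-s) ++ R) → ∀ ab : Int × Int,
    (solveStep^[k] (h, ab)).1.Ordered ∧
    (solveStep^[k] (h, ab)).1.toList.Perm
      (List.replicate (n-k) (-s) ++ (R ++ (List.replicate k (-(aOf s)) ++ List.replicate k (-(bOf s))))) ∧
    (solveStep^[k] (h, ab)).2 = if k = 0 then ab else (aOf s, bOf s) := by
  intro k
  induction k with
  | zero =>
    intro n _ R h hR hord hH ab
    refine ⟨hord, ?_, by simp⟩
    simpa using hH
  | succ k ih =>
    intro n hkn R h hR hord hH ab
    obtain ⟨ho1, h1, h2⟩ := solveStep_spec s n (by omega) R hR h hord hH ab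
    have hcb := child_bounds hs
    have hR' : ∀ x ∈ R ++ [-(aOf s), -(bOf s)], -s ≤ x := by
      intro x hx
      rcases List.mem_append.1 hx with hx' | hx'
      · exact hR x hx'
      · simp at hx'; rcases hx' with rfl | rfl <;> omega
    obtain ⟨iho, ihp, ihe⟩ := ih (n-1) (by omega) (R ++ [-(aOf s), -(bOf s)])
      (solveStep (h, ab)).1 hR' ho1 h1 (solveStep (h, ab)).2
    rw [Function.iterate_succ_apply]
    refine ⟨iho, ?_, ?_⟩
    · refine List.Perm.trans ihp ?_
      rw [show n - 1 - k = n - (k+1) from by omega]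
      refine List.Perm.append_left _ ?_
      apply List.perm_iff_count.2
      intro a
      simp [List.count_append, List.count_replicate, List.count_cons]
      split_ifs <;> simp_all <;> try omega
    · rw [ihe]
      cases k with
      | zero => simp [h2]
      | succ k' => simp

lemma run_zero :
    ∀ (k : Nat) (h : SkewHeap) (ab : Int × Int), h.Ordered →
    0 ∈ h.toList → (∀ x ∈ h.toList, 0 ≤ x) →
    ((solveStep^[k] (h, ab)).1.Ordered ∧ 0 ∈ (solveStep^[k] (h, ab)).1.toList ∧
      ∀ x ∈ (solveStep^[k] (h, ab)).1.toList, 0 ≤ x) ∧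
    (solveStep^[k] (h, ab)).2 = if k = 0 then ab else (-1, 0) := by
  intro k
  induction k with
  | zero => intro h ab h1 h2 h3; exact ⟨⟨h1, h2, h3⟩, by simp⟩
  | succ k ih =>
    intro h ab hord hmem hnn
    have ha0 : aOf 0 = -1 := by decide
    have hb0 : bOf 0 = 0 := by decide
    have hdecomp : h.toList.Perm
        (List.replicate (h.toList.count 0) 0 ++ h.toList.filter (fun x => !(x == 0))) := by
      have hfp := List.filter_append_perm (fun x => x == 0) h.toList
      rw [List.filter_beq (0:Int)] at hfp
      exact hfp.symm
    have hcnt : 1 ≤ h.toList.count 0 := List.count_pos_iff.2 hmem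
    obtain ⟨ho1, hp1, he1⟩ := solveStep_spec 0 (h.toList.count 0) hcnt
      (h.toList.filter (fun x => !(x == 0)))
      (by intro x hx; simpa using hnn x (List.mem_of_mem_filter hx))
      h hord (by simpa using hdecomp) ab
    rw [Function.iterate_succ_apply]
    have hmem' : (0:Int) ∈ (solveStep (h, ab)).1.toList := by
      refine hp1.mem_iff.2 ?_
      refine List.mem_append.2 (Or.inr (List.mem_append.2 (Or.inr ?_)))
      simp [hb0]
    have hnn' : ∀ x ∈ (solveStep (h, ab)).1.toList, 0 ≤ x := by
      intro x hx
      rcases List.mem_append.1 (hp1.subset hx) with hx' | hx'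
      · rw [List.eq_of_mem_replicate hx']; norm_num
      · rcases List.mem_append.1 hx' with hx'' | hx''
        · exact hnn x (List.mem_of_mem_filter hx'')
        · simp [ha0, hb0] at hx''; rcases hx'' with rfl | rfl <;> norm_num
    obtain ⟨hg, he⟩ := ih (solveStep (h, ab)).1 (solveStep (h, ab)).2 ho1 hmem' hnn'
    refine ⟨hg, ?_⟩
    rw [he]
    split_ifs <;> simp_all

lemma sorted_pair_rev {a b : Int} (h : a ≤ b) :
    PySem.List.sorted [a, b] (fun x => x) true = [b, a] := by
  rcases eq_or_lt_of_le h with he | hlt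
  · subst he
    exact PySem.List.sorted_rev_eq_self_of_pairwise [a, a] _ (by simp)
  · exact PySem.List.sorted_rev_eq_of_perm_of_pairwise_gt [a, b] [b, a] _
      (List.Perm.swap a b []) (by simp [hlt])

lemma foldl_const_iterate {α β : Type} (f : α → α) (l : List β) (init : α) :
    l.foldl (fun s _ => f s) init = f^[l.length] init := by
  induction l generalizing init with
  | nil => rfl
  | cons x t ih => simp [List.foldl_cons, ih, Function.iterate_succ_apply]

lemma solve_eq_iterate (N K : Int) :
    solve N K = PySem.List.sorted [(solveStep^[K.toNat] (SkewHeap.node (-N) .nil .nil, ((0:Int), (0:Int)))).2.1,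
      (solveStep^[K.toNat] (SkewHeap.node (-N) .nil .nil, ((0:Int), (0:Int)))).2.2] (fun x => x) true := by
  unfold solve
  rw [foldl_const_iterate, PySem.List.length_pyRange_one]
  norm_num

lemma level_run :
    ∀ (fuel : Nat) (hi chi clo K : Int) (H : SkewHeap) (ab : Int × Int),
    1 ≤ hi → 1 ≤ chi → 0 ≤ clo → 1 ≤ K → hi.toNat < fuel → H.Ordered →
    H.toList.Perm (List.replicate chi.toNat (-hi) ++ List.replicate clo.toNat (-(hi-1))) →
    PySem.List.sorted [(solveStep^[K.toNat] (H, ab)).2.1, (solveStep^[K.toNat] (H, ab)).2.2]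
      (fun x => x) true = solveAltLoop fuel hi chi clo K := by
  intro fuel
  induction fuel with
  | zero => intro hi chi clo K H ab h1 h2 h3 h4 h5 h6 h7; omega
  | succ fuel ih =>
    intro hi chi clo K H ab hhi hchi hclo hK hfuel hord hH
    have hcb := child_bounds hhi
    by_cases hloop : 1 < hi ∧ chi + clo < K
    · -- B skips one whole level; A performs its chi + clo pops in two batched runs
      simp only [solveAltLoop]
      rw [if_pos hloop]
      have hK' : 1 ≤ K - (chi + clo) := by omega
      rw [show K.toNat = (K - (chi + clo)).toNat + clo.toNat + chi.toNat from by omega,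
        Function.iterate_add_apply, Function.iterate_add_apply]
      obtain ⟨ho1, hp1, _⟩ := run_pops hi hhi chi.toNat chi.toNat le_rfl
        (List.replicate clo.toNat (-(hi-1))) H
        (by intro x hx; rw [List.eq_of_mem_replicate hx]; omega) hord hH ab
      simp only [Nat.sub_self, List.replicate_zero, List.nil_append] at hp1
      have hcb' := child_bounds (by omega : 1 ≤ hi - 1)
      obtain ⟨ho2, hp2, _⟩ := run_pops (hi-1) (by omega) clo.toNat clo.toNat le_rfl
        (List.replicate chi.toNat (-(aOf hi)) ++ List.replicate chi.toNat (-(bOf hi)))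
        (solveStep^[chi.toNat] (H, ab)).1
        (by intro x hx
            rcases List.mem_append.1 hx with hx' | hx' <;>
              rw [List.eq_of_mem_replicate hx'] <;> omega)
        ho1 hp1 (solveStep^[chi.toNat] (H, ab)).2
      simp only [Nat.sub_self, List.replicate_zero, List.nil_append] at hp2
      have hm2 : PySem.Int.mod hi 2 = hi % 2 := PySem.Int.mod_eq_emod_of_pos (by omega)
      have hfd2 : PySem.Int.floordiv hi 2 = hi / 2 :=
        PySem.Int.floordiv_eq_ediv_of_pos (by omega)
      have hav : aOf hi = (hi - 1) / 2 := by
        simp only [aOf]; rw [PySem.Int.floordiv_eq_ediv_of_pos (by omega : (0:Int) < 2)]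
      have hbv : bOf hi = (hi - 1) - (hi - 1) / 2 := by simp only [bOf, hav]
      have hav' : aOf (hi - 1) = (hi - 2) / 2 := by
        simp only [aOf]; rw [PySem.Int.floordiv_eq_ediv_of_pos (by omega : (0:Int) < 2)]
        omega
      have hbv' : bOf (hi - 1) = (hi - 2) - (hi - 2) / 2 := by
        simp only [bOf, hav']; ring
      by_cases hpar : PySem.Int.mod hi 2 = 0
      · rw [if_pos hpar, hfd2]
        rw [hm2] at hpar
        have hperm : (solveStep^[clo.toNat] (solveStep^[chi.toNat] (H, ab))).1.toList.Perm
            (List.replicate chi.toNat (-(hi / 2)) ++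
              List.replicate (chi + 2 * clo).toNat (-(hi / 2 - 1))) := by
          refine hp2.trans ?_
          apply List.perm_iff_count.2
          intro x
          simp only [List.count_append, List.count_replicate, hav, hbv, hav', hbv', beq_iff_eq]
          split_ifs <;> omega
        exact ih (hi / 2) chi (chi + 2 * clo) (K - (chi + clo))
          (solveStep^[clo.toNat] (solveStep^[chi.toNat] (H, ab))).1
          (solveStep^[clo.toNat] (solveStep^[chi.toNat] (H, ab))).2
          (by omega) hchi (by omega) hK' (by omega) ho2 hperm
      · rw [if_neg hpar, hfd2]
        rw [hm2] at hpar
        have hpar' : hi % 2 = 1 := by omega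
        have hperm : (solveStep^[clo.toNat] (solveStep^[chi.toNat] (H, ab))).1.toList.Perm
            (List.replicate (2 * chi + clo).toNat (-(hi / 2)) ++
              List.replicate clo.toNat (-(hi / 2 - 1))) := by
          refine hp2.trans ?_
          apply List.perm_iff_count.2
          intro x
          simp only [List.count_append, List.count_replicate, hav, hbv, hav', hbv', beq_iff_eq]
          split_ifs <;> omega
        exact ih (hi / 2) (2 * chi + clo) clo (K - (chi + clo))
          (solveStep^[clo.toNat] (solveStep^[chi.toNat] (H, ab))).1
          (solveStep^[clo.toNat] (solveStep^[chi.toNat] (H, ab))).2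
          (by omega) (by omega) hclo hK' (by omega) ho2 hperm
    · -- loop exit: the final split happens inside the current level
      simp only [solveAltLoop]
      rw [if_neg hloop]
      by_cases hKchi : K ≤ chi
      · -- all K pops are of size hi
        obtain ⟨_, _, he⟩ := run_pops hi hhi K.toNat chi.toNat (by omega)
          (List.replicate clo.toNat (-(hi-1))) H
          (by intro x hx; rw [List.eq_of_mem_replicate hx]; omega) hord hH ab
        rw [he, if_neg (by omega : ¬ K.toNat = 0)]
        rw [sorted_pair_rev hcb.2.1]
        rw [if_pos (Or.inr hKchi)]
        simp only [aOf, bOf]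
      · -- chi < K: pop all chi chunks of size hi first
        have hKs : (if hi = 0 ∨ K ≤ chi then hi else hi - 1) = hi - 1 :=
          if_neg (by omega)
        rw [hKs]
        rw [show K.toNat = (K - chi).toNat + chi.toNat from by omega,
          Function.iterate_add_apply]
        obtain ⟨ho1, hp1, _⟩ := run_pops hi hhi chi.toNat chi.toNat le_rfl
          (List.replicate clo.toNat (-(hi-1))) H
          (by intro x hx; rw [List.eq_of_mem_replicate hx]; omega) hord hH ab
        simp only [Nat.sub_self, List.replicate_zero, List.nil_append] at hp1
        by_cases hhi1 : hi = 1
        · -- the rest of the heap is all zeros: every later split is of a 0 chunk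
          subst hhi1
          have ha0 : aOf 1 = 0 := by decide
          have hb0 : bOf 1 = 0 := by decide
          have hall : ∀ x ∈ (solveStep^[chi.toNat] (H, ab)).1.toList, x = 0 := by
            intro x hx
            have := hp1.subset hx
            simp only [ha0, hb0, neg_zero, sub_self] at this
            rcases List.mem_append.1 this with h | h
            · rw [List.eq_of_mem_replicate h]
            · rcases List.mem_append.1 h with h' | h' <;> rw [List.eq_of_mem_replicate h']
          have hzmem : (0:Int) ∈ (solveStep^[chi.toNat] (H, ab)).1.toList := by
            refine hp1.mem_iff.2 ?_
            simp only [ha0, hb0, neg_zero, sub_self]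
            refine List.mem_append.2 (Or.inr (List.mem_append.2 (Or.inl ?_)))
            exact List.mem_replicate.2 ⟨by omega, rfl⟩
          obtain ⟨_, he⟩ := run_zero (K - chi).toNat (solveStep^[chi.toNat] (H, ab)).1
            (solveStep^[chi.toNat] (H, ab)).2 ho1 hzmem (fun x hx => le_of_eq (hall x hx).symm)
          rw [he, if_neg (by omega : ¬ (K - chi).toNat = 0)]
          rw [sorted_pair_rev (by norm_num : (-1:Int) ≤ 0)]
          have hfd : PySem.Int.floordiv (1 - 1 - 1) 2 = -1 := by decide
          rw [hfd]
          norm_num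
        · -- hi ≥ 2 and K ≤ chi + clo: the final split is of a chunk of size hi - 1
          have hh2 : 2 ≤ hi := by omega
          have hKlo : K - chi ≤ clo := by
            by_contra hc
            exact hloop ⟨by omega, by omega⟩
          have hcb' := child_bounds (by omega : 1 ≤ hi - 1)
          obtain ⟨_, _, he⟩ := run_pops (hi-1) (by omega) (K - chi).toNat clo.toNat (by omega)
            (List.replicate chi.toNat (-(aOf hi)) ++ List.replicate chi.toNat (-(bOf hi)))
            (solveStep^[chi.toNat] (H, ab)).1
            (by intro x hx
                rcases List.mem_append.1 hx with hx' | hx' <;>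
                  rw [List.eq_of_mem_replicate hx'] <;> omega)
            ho1 hp1 (solveStep^[chi.toNat] (H, ab)).2
          rw [he, if_neg (by omega : ¬ (K - chi).toNat = 0)]
          rw [sorted_pair_rev hcb'.2.1]
          simp only [aOf, bOf]

theorem solve_spec : Claim_equal_solve := by
  intro N K _ hPre
  obtain ⟨hN, hK⟩ := hPre
  show solve N K = solve_alt N K
  rw [solve_eq_iterate]
  rcases eq_or_lt_of_le hN with h0 | hpos
  · -- N = 0: the heap holds a single 0 chunk and every pop splits a 0 chunk
    subst h0
    obtain ⟨_, he⟩ := run_zero K.toNat (SkewHeap.node (-(0:Int)) .nil .nil) ((0:Int), (0:Int))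
      (by simp [SkewHeap.Ordered, SkewHeap.toList])
      (by simp [SkewHeap.toList])
      (by intro x hx; simp [SkewHeap.toList] at hx; omega)
    rw [he, if_neg (by omega : ¬ K.toNat = 0)]
    rw [sorted_pair_rev (by norm_num : (-1:Int) ≤ 0)]
    have halt : solve_alt 0 K = [0, -1] := by
      show solveAltLoop ((0:Int).toNat + 2) 0 1 0 K = [0, -1]
      rw [show (0:Int).toNat + 2 = 2 from rfl]
      simp only [solveAltLoop]
      rw [if_neg (by omega : ¬ ((1:Int) < 0 ∧ 1 + 0 < K))]
      simp only [true_or, if_true]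
      norm_num [show PySem.Int.floordiv (-1 : Int) 2 = -1 from by decide]
    rw [halt]
  · -- 1 ≤ N: the level invariant starts with one chunk of size N
    have h := level_run (N.toNat + 2) N 1 0 K (SkewHeap.node (-N) .nil .nil) (0, 0)
      hpos le_rfl le_rfl hK (by omega)
      (by simp [SkewHeap.Ordered, SkewHeap.toList])
      (by simp [SkewHeap.toList])
    rw [show solve_alt N K = solveAltLoop (N.toNat + 2) N 1 0 K from rfl]
    exact h
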